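-- pv_equiv track=rewrite | github.com/Yuki2t1/PYTHON-PROBLEMS | Chapter2/EX3/EX3.py | primaire
-- ===== SOURCE A (Python) =====
-- def premier(x):
--     x=int(x)
--     i=2
--     while(i<=x//2 and x%i!=0):
--         i+=1
--     return(i>x//2 and x>1)
--
-- def puissance(x,y):
--     p=1
--     for i in range(y):
--         p*=x
--     return(p)
--
-- def primaire(x):
--     x=int(x)
--     if premier(x):
--         ok=True
--     else:
--         ok=False
--         counter=2
--
--         while counter<=x and not ok:
--             i=1
--             while puissance(counter,i)<x:
--                 i+=1
--             if puissance(counter,i)==x: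
--                 ok=True
--             else:
--                 counter+=1
--             while not(premier(counter)):
--                 counter+=1
--
--     return(ok)
-- ===== SOURCE B (Python) =====
-- def primaire(x):
--     x = int(x)
--     if x <= 1:
--         return False
--     # find smallest prime factor by trial division up to sqrt(x)
--     p = 0
--     d = 2
--     while d * d <= x:
--         if x % d == 0:
--             p = d
--             break
--         d += 1
--     if p == 0:
--         return True  # x itself is prime
--     # x is a prime power iff it is a pure power of its smallest prime factor
--     while x % p == 0:
--         x //= p
--     return x == 1
-- ===== Notes on version B (the rewrite author's own statement) =====
-- stated objective: faster
-- what changed: Instead of enumerating all primes up to x and probing each one's powers (with a quadratic trial-division primality test inside the loop), B trial-divides only up to sqrt(x) to find the smallest prime factor and then checks that x is a pure power of it.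
import Mathlib
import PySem

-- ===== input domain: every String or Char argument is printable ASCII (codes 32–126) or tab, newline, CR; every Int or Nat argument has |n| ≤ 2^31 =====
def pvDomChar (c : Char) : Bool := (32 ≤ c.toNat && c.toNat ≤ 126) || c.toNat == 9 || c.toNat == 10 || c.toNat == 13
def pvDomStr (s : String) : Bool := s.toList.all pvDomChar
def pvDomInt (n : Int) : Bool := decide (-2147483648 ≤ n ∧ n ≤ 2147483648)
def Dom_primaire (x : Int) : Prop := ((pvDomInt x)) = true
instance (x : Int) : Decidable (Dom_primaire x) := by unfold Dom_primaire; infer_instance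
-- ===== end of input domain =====

-- B trial-divides to √x for the smallest prime factor and checks x is a pure power of it,
-- instead of A's scan over all primes up to x; objective: faster (asymptotic).

-- ===== PORT A =====
-- while(i<=x//2 and x%i!=0): i+=1
def premierLoop (x : Int) : Nat → Int → Int
  | 0, i => i
  | f+1, i =>
    if i ≤ PySem.Int.floordiv x 2 ∧ PySem.Int.mod x i ≠ 0 then premierLoop x f (i+1)
    else i

def premier (x : Int) : Bool :=
  let i := premierLoop x (x.toNat + 2) 2
  decide (i > PySem.Int.floordiv x 2 ∧ x > 1)

-- p=1; for i in range(y): p*=x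
def puissance (x y : Int) : Int :=
  (PySem.List.pyRange 0 y 1).foldl (fun p _ => p * x) 1

-- i=1; while puissance(counter,i)<x: i+=1
def powIdxLoop (c x : Int) : Nat → Int → Int
  | 0, i => i
  | f+1, i => if puissance c i < x then powIdxLoop c x f (i+1) else i

-- while not(premier(counter)): counter+=1
def skipLoop : Nat → Int → Int
  | 0, c => c
  | f+1, c => if ¬ (premier c = true) then skipLoop f (c+1) else c

-- while counter<=x and not ok: …  (state = (counter, ok))
def outerLoop (x : Int) : Nat → Int → Bool → Bool
  | 0, _, ok => ok
  | f+1, c, ok =>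
    if c ≤ x ∧ ok = false then
      let i := powIdxLoop c x (x.toNat + 2) 1
      if puissance c i = x then
        outerLoop x f (skipLoop (2 * x.toNat + 10) c) true
      else
        outerLoop x f (skipLoop (2 * x.toNat + 10) (c+1)) false
    else ok

def primaire (x : Int) : Bool :=
  if premier x then true
  else outerLoop x (x.toNat + 2) 2 false

-- ===== PORT B =====
-- p=0; d=2; while d*d<=x: if x%d==0: p=d; break; d+=1
def smallestFactorLoop (x : Int) : Nat → Int → Int
  | 0, _ => 0
  | f+1, d =>
    if d * d ≤ x then
      if PySem.Int.mod x d = 0 then d else smallestFactorLoop x f (d+1)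
    else 0

-- while x%p==0: x//=p
def divideOutLoop (p : Int) : Nat → Int → Int
  | 0, y => y
  | f+1, y =>
    if PySem.Int.mod y p = 0 then divideOutLoop p f (PySem.Int.floordiv y p)
    else y

def primaire_alt (x : Int) : Bool :=
  if x ≤ 1 then false
  else
    let p := smallestFactorLoop x (x.toNat + 2) 2
    if p = 0 then true
    else decide (divideOutLoop p (x.toNat + 2) x = 1)

-- ===== PRECONDITION & SPEC =====
def Spec_primaire (x : Int) (out : Bool) : Prop := out = primaire_alt x
instance (x : Int) (out : Bool) : Decidable (Spec_primaire x out) := by unfold Spec_primaire; infer_instance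

-- ===== CLAIM (what is proved, stated in full; the proofs are below) =====
def Claim_equal_primaire : Prop := ∀ (x : Int), Dom_primaire x → Spec_primaire x (primaire x)

-- ===== LEMMAS AND PROOFS =====
-- Both ports are shown to decide the same predicate PP: x = p^k for a prime p and some k ≥ 1.

theorem foldl_mul_const (c : Int) : ∀ (l : List Int) (p : Int),
    l.foldl (fun p _ => p * c) p = p * c ^ l.length
  | [], p => by simp
  | a :: l, p => by
    simp [List.foldl, foldl_mul_const c l (p * c), pow_succ]; ring

theorem puissance_eq (c y : Int) : puissance c y = c ^ y.toNat := by
  unfold puissance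
  rw [foldl_mul_const, PySem.List.length_pyRange_one]
  simp

theorem premierLoop_spec (x : Int) : ∀ (f : Nat) (i : Int),
    PySem.Int.floordiv x 2 < i + f →
    i ≤ premierLoop x f i ∧
    ¬(premierLoop x f i ≤ PySem.Int.floordiv x 2 ∧ PySem.Int.mod x (premierLoop x f i) ≠ 0) ∧
    ∀ m, i ≤ m → m < premierLoop x f i → (m ≤ PySem.Int.floordiv x 2 ∧ PySem.Int.mod x m ≠ 0)
  | 0, i => by
    intro hf
    refine ⟨le_refl _, ?_, ?_⟩
    · simp only [premierLoop]; intro ⟨h1, h2⟩; omega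
    · intro m h1 h2; simp only [premierLoop] at h2; omega
  | f+1, i => by
    intro hf
    simp only [premierLoop]
    split
    · rename_i hcond
      have ih := premierLoop_spec x f (i+1) (by omega)
      refine ⟨by omega, ih.2.1, ?_⟩
      intro m h1 h2
      rcases eq_or_lt_of_le h1 with h | h
      · exact h ▸ hcond
      · exact ih.2.2 m (by omega) h2
    · rename_i hcond
      exact ⟨le_refl _, hcond, by intro m h1 h2; omega⟩

theorem premier_iff (x : Int) : premier x = true ↔ 1 < x ∧ Nat.Prime x.toNat := by
  unfold premier
  have hfd : PySem.Int.floordiv x 2 < 2 + (x.toNat + 2 : Nat) := by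
    rw [PySem.Int.floordiv_eq_ediv_of_pos (by omega)]
    omega
  obtain ⟨h1, h2, h3⟩ := premierLoop_spec x (x.toNat + 2) 2 hfd
  set j := premierLoop x (x.toNat + 2) 2 with hj
  simp only [decide_eq_true_eq]
  constructor
  · rintro ⟨hgt, hx1⟩
    refine ⟨hx1, ?_⟩
    -- no m in [2, x//2] divides x; conclude primality
    rw [Nat.prime_def_lt]
    refine ⟨by omega, ?_⟩
    intro m hm hdvd
    by_contra hne
    have hm2 : 2 ≤ m := by
      rcases Nat.eq_zero_or_pos m with h | h
      · subst h; simp at hdvd; omega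
      · omega
    -- m ∣ n, m < n → 2*m ≤ n
    obtain ⟨k, hk⟩ := hdvd
    have hk2 : 2 ≤ k := by nlinarith [hm, hk, hm2]
    have hmle : (m : Int) ≤ PySem.Int.floordiv x 2 := by
      rw [PySem.Int.floordiv_eq_ediv_of_pos (by omega)]
      have : 2 * m ≤ x.toNat := by nlinarith
      omega
    have hd3 := (h3 (m : Int) (by exact_mod_cast hm2) (by omega)).2
    rw [Ne, PySem.Int.mod_eq_zero_iff_dvd] at hd3
    exact hd3 (by
      refine ⟨(k : Int), ?_⟩
      have : x = (x.toNat : Int) := by omega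
      rw [this]; exact_mod_cast hk)
  · rintro ⟨hx1, hp⟩
    refine ⟨?_, hx1⟩
    by_contra hle
    push Not at hle
    have hj2 : (2:Int) ≤ j := h1
    have hmod : PySem.Int.mod x j = 0 := by
      by_contra hne
      exact h2 ⟨hle, hne⟩
    rw [PySem.Int.mod_eq_zero_iff_dvd] at hmod
    -- j divides x, 2 ≤ j ≤ x//2 < x: contradicts primality
    have hfd2 : PySem.Int.floordiv x 2 = ((x.toNat / 2 : Nat) : Int) := by
      rw [PySem.Int.floordiv_eq_ediv_of_pos (by omega)]
      omega
    have hjn : (j.toNat : Int) = j := Int.toNat_of_nonneg (by omega)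
    have hdvd : j.toNat ∣ x.toNat := by
      rw [← Int.natCast_dvd_natCast, hjn]
      have : (x.toNat : Int) = x := by omega
      rw [this]; exact hmod
    rcases (Nat.Prime.eq_one_or_self_of_dvd hp _ hdvd) with h | h
    · omega
    · rw [hfd2] at hle; omega

theorem powIdxLoop_spec (c x : Int) : ∀ (f : Nat) (i : Int),
    x ≤ puissance c (i + f) →
    i ≤ powIdxLoop c x f i ∧
    ¬ puissance c (powIdxLoop c x f i) < x ∧
    ∀ m, i ≤ m → m < powIdxLoop c x f i → puissance c m < x
  | 0, i => by
    intro hf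
    simp only [powIdxLoop]
    exact ⟨le_refl _, by simpa using hf, by intro m h1 h2; omega⟩
  | f+1, i => by
    intro hf
    simp only [powIdxLoop]
    split
    · rename_i hcond
      have ih := powIdxLoop_spec c x f (i+1) (by rw [show i+1+(f:Int) = i+(f+1:Nat) by push_cast; ring]; exact hf)
      refine ⟨by omega, ih.2.1, ?_⟩
      intro m h1 h2
      rcases eq_or_lt_of_le h1 with h | h
      · exact h ▸ hcond
      · exact ih.2.2 m (by omega) h2
    · rename_i hcond
      exact ⟨le_refl _, hcond, by intro m h1 h2; omega⟩

-- the inner loop + equality test decides "x is a positive power of c"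
theorem powCheck_iff (c x : Int) (hc : 2 ≤ c) (hx : 2 ≤ x) :
    (puissance c (powIdxLoop c x (x.toNat + 2) 1) = x) ↔ ∃ k : Nat, 1 ≤ k ∧ c ^ k = x := by
  have hfuel : x ≤ puissance c (1 + (x.toNat + 2 : Nat)) := by
    rw [puissance_eq]
    have h1 : x ≤ (x.toNat : Int) := by omega
    have h2 : (x.toNat : Int) < 2 ^ x.toNat := by
      exact_mod_cast Nat.lt_two_pow_self
    have h3 : (2:Int) ^ x.toNat ≤ 2 ^ (1 + (x.toNat + 2 : Nat) : Int).toNat := by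
      apply pow_le_pow_right₀ (by norm_num)
      omega
    have h4 : (2:Int) ^ (1 + (x.toNat + 2 : Nat) : Int).toNat ≤ c ^ (1 + (x.toNat + 2 : Nat) : Int).toNat := by
      exact pow_le_pow_left₀ (by norm_num) hc _
    omega
  obtain ⟨h1, h2, h3⟩ := powIdxLoop_spec c x (x.toNat + 2) 1 hfuel
  set j := powIdxLoop c x (x.toNat + 2) 1 with hj
  constructor
  · intro he
    exact ⟨j.toNat, by omega, by rw [← puissance_eq, he]⟩
  · rintro ⟨k, hk1, hk⟩
    rw [puissance_eq] at *
    have hmono : StrictMono (fun n : Nat => c ^ n) := fun a b hab => by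
      exact pow_lt_pow_right₀ (by omega) hab
    have hjk : j.toNat = k := by
      by_contra hne
      rcases Nat.lt_or_ge j.toNat k with h | h
      · have := hmono h
        simp only at this
        rw [hk] at this
        omega
      · have hkj : (k : Int) < j := by omega
        have := h3 (k : Int) (by exact_mod_cast hk1) hkj
        rw [puissance_eq] at this
        simp only [Int.toNat_natCast] at this
        omega
    rw [hjk, hk]

theorem skipLoop_spec : ∀ (f : Nat) (c : Int),
    (∃ q : Int, premier q = true ∧ c ≤ q ∧ q < c + f + 1) →
    c ≤ skipLoop f c ∧ premier (skipLoop f c) = true ∧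
    ∀ m, c ≤ m → m < skipLoop f c → premier m = false
  | 0, c => by
    rintro ⟨q, hq1, hq2, hq3⟩
    have : q = c := by omega
    subst this
    simp only [skipLoop]
    exact ⟨le_refl _, hq1, by intro m h1 h2; omega⟩
  | f+1, c => by
    rintro ⟨q, hq1, hq2, hq3⟩
    simp only [skipLoop]
    split
    · rename_i hcond
      simp only [Bool.not_eq_true] at hcond
      have hqc : q ≠ c := by rintro rfl; rw [hq1] at hcond; simp at hcond
      have ih := skipLoop_spec f (c+1) ⟨q, hq1, by omega, by omega⟩
      refine ⟨by omega, ih.2.1, ?_⟩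
      intro m h1 h2
      rcases eq_or_lt_of_le h1 with h | h
      · rw [← h]; exact hcond
      · exact ih.2.2 m (by omega) h2
    · rename_i hcond
      simp only [not_not] at hcond
      exact ⟨le_refl _, hcond, by intro m h1 h2; omega⟩

-- Bertrand gives a prime within the skip fuel
theorem skip_fuel_ok (x c : Int) (hc : 2 ≤ c) (hcx : c ≤ x + 1) :
    ∃ q : Int, premier q = true ∧ c ≤ q ∧ q < c + (2 * x.toNat + 10 : Nat) + 1 := by
  obtain ⟨p, hp, hlt, hle⟩ := Nat.exists_prime_lt_and_le_two_mul (c.toNat - 1) (by omega)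
  refine ⟨(p : Int), ?_, by omega, ?_⟩
  · rw [premier_iff]
    constructor
    · have := hp.two_le; omega
    · simpa using hp
  · have := hp.two_le
    push_cast
    omega

def PPI (x : Int) : Prop := ∃ q : Int, 2 ≤ q ∧ premier q = true ∧ ∃ k : Nat, 1 ≤ k ∧ q ^ k = x

theorem notPPI (x c : Int) (hxc : x < c)
    (hinv : ∀ q : Int, 2 ≤ q → q < c → premier q = true → ¬ ∃ k : Nat, 1 ≤ k ∧ q ^ k = x) :
    ¬ PPI x := by
  rintro ⟨q, hq2, hqp, k, hk1, hk⟩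
  have hqx : q ≤ x := by
    rw [← hk]
    calc q = q ^ 1 := (pow_one q).symm
    _ ≤ q ^ k := pow_le_pow_right₀ (by omega) (by omega)
  exact hinv q hq2 (by omega) hqp ⟨k, hk1, hk⟩

theorem outerLoop_true (x : Int) : ∀ (f : Nat) (c : Int), outerLoop x f c true = true
  | 0, c => rfl
  | f+1, c => by simp only [outerLoop]; split <;> simp_all

theorem outer_spec (x : Int) (hx : 2 ≤ x) : ∀ (f : Nat) (c : Int),
    2 ≤ c → premier c = true →
    (∀ q : Int, 2 ≤ q → q < c → premier q = true → ¬ ∃ k : Nat, 1 ≤ k ∧ q ^ k = x) →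
    (x + 1 - c).toNat ≤ f →
    (outerLoop x f c false = true ↔ PPI x)
  | 0, c => by
    intro hc hcp hinv hf
    simp only [outerLoop]
    constructor
    · intro h; cases h
    · intro h; exact absurd h (notPPI x c (by omega) hinv)
  | f+1, c => by
    intro hc hcp hinv hf
    simp only [outerLoop]
    split
    · rename_i hcond
      obtain ⟨hcx, -⟩ := hcond
      split
      · rename_i hck
        rw [outerLoop_true]
        constructor
        · intro _
          exact ⟨c, hc, hcp, (powCheck_iff c x hc hx).1 hck⟩
        · intro _; rfl
      · rename_i hck
        have hnc : ¬ ∃ k : Nat, 1 ≤ k ∧ c ^ k = x := fun h => hck ((powCheck_iff c x hc hx).2 h)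
        obtain ⟨hs1, hs2, hs3⟩ := skipLoop_spec (2 * x.toNat + 10) (c+1) (skip_fuel_ok x (c+1) (by omega) (by omega))
        set c' := skipLoop (2 * x.toNat + 10) (c+1) with hc'
        apply outer_spec x hx f c' (by omega) hs2
        · intro q hq2 hqc' hqp
          rcases lt_trichotomy q c with h | h | h
          · exact hinv q hq2 h hqp
          · subst h; exact hnc
          · exact absurd (hs3 q (by omega) hqc') (by simp [hqp])
        · omega
    · rename_i hcond
      have hxc : x < c := by
        by_contra h
        exact hcond ⟨by omega, by trivial⟩
      constructor
      · intro h; cases h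
      · intro h; exact absurd h (notPPI x c hxc hinv)

def PP (x : Int) : Prop := ∃ p k : Nat, Nat.Prime p ∧ 1 ≤ k ∧ ((p : Int)) ^ k = x

theorem PPI_iff_PP (x : Int) : PPI x ↔ PP x := by
  constructor
  · rintro ⟨q, hq2, hqp, k, hk1, hk⟩
    obtain ⟨-, hpr⟩ := (premier_iff q).1 hqp
    refine ⟨q.toNat, k, hpr, hk1, ?_⟩
    rw [Int.toNat_of_nonneg (by omega)]
    exact hk
  · rintro ⟨p, k, hp, hk1, hk⟩
    have h2 := hp.two_le
    refine ⟨(p : Int), by exact_mod_cast h2, ?_, k, hk1, hk⟩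
    rw [premier_iff]
    exact ⟨by exact_mod_cast hp.one_lt, by simpa using hp⟩

theorem primaire_iff (x : Int) : primaire x = true ↔ PP x := by
  unfold primaire
  split
  · rename_i hp
    obtain ⟨hx1, hpr⟩ := (premier_iff x).1 hp
    simp only [true_iff]
    exact ⟨x.toNat, 1, hpr, le_refl _, by simpa using by omega⟩
  · rename_i hp
    rcases le_or_gt x 1 with hx | hx
    · -- outer loop never runs
      have : outerLoop x (x.toNat + 2) 2 false = false := by
        show outerLoop x (x.toNat + 1 + 1) 2 false = false
        rw [outerLoop]
        split
        · rename_i h; omega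
        · rfl
      rw [this]
      simp only [Bool.false_eq_true, false_iff]
      rintro ⟨p, k, hpp, hk1, hk⟩
      have h2 := hpp.two_le
      have : (2:Int) ≤ (p:Int) ^ k := by
        calc (2:Int) ≤ (p:Int) := by exact_mod_cast h2
        _ = (p:Int) ^ 1 := (pow_one _).symm
        _ ≤ (p:Int) ^ k := pow_le_pow_right₀ (by exact_mod_cast Nat.one_le_of_lt hpp.one_lt) (by omega)
      omega
    · rw [outer_spec x (by omega) (x.toNat + 2) 2 (le_refl _) (by decide)
        (by intro q hq2 hqc; omega) (by omega)]
      exact PPI_iff_PP x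

theorem sf_spec (x : Int) : ∀ (f : Nat) (d : Int), 2 ≤ d → x < (d + f) * (d + f) →
    (smallestFactorLoop x f d = 0 ∧ ∀ m, d ≤ m → m * m ≤ x → ¬ (m ∣ x)) ∨
    (d ≤ smallestFactorLoop x f d ∧
     smallestFactorLoop x f d * smallestFactorLoop x f d ≤ x ∧
     smallestFactorLoop x f d ∣ x ∧
     ∀ m, d ≤ m → m < smallestFactorLoop x f d → ¬ (m ∣ x))
  | 0, d => by
    intro hd hf
    simp only [smallestFactorLoop]
    left
    refine ⟨by trivial, ?_⟩
    intro m h1 h2 _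
    push_cast at hf
    nlinarith
  | f+1, d => by
    intro hd hf
    simp only [smallestFactorLoop]
    split
    · split
      · rename_i hle hmod
        rw [PySem.Int.mod_eq_zero_iff_dvd] at hmod
        right
        exact ⟨le_refl _, by assumption, hmod, by intro m h1 h2 _; omega⟩
      · rename_i hle hmod
        simp only [PySem.Int.mod_eq_zero_iff_dvd] at hmod
        have ih := sf_spec x f (d+1) (by omega) (by push_cast at hf ⊢; nlinarith)
        rcases ih with ⟨h0, hall⟩ | ⟨h1, h2, h3, h4⟩
        · left
          refine ⟨h0, ?_⟩
          intro m hm1 hm2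
          rcases eq_or_lt_of_le hm1 with h | h
          · exact h ▸ hmod
          · exact hall m (by omega) hm2
        · right
          refine ⟨by omega, h2, h3, ?_⟩
          intro m hm1 hm2
          rcases eq_or_lt_of_le hm1 with h | h
          · exact h ▸ hmod
          · exact h4 m (by omega) hm2
    · rename_i hgt
      left
      refine ⟨by trivial, ?_⟩
      intro m h1 h2 _
      nlinarith [h1, h2, hd]

theorem divOut_spec (p : Int) (hp : 2 ≤ p) : ∀ (f : Nat) (y : Int), 1 ≤ y → y ≤ (f : Int) →
    (divideOutLoop p f y = 1 ↔ ∃ k : Nat, p ^ k = y)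
  | 0, y => by intro h1 h2; omega
  | f+1, y => by
    intro h1 h2
    simp only [divideOutLoop]
    split
    · rename_i hmod
      rw [PySem.Int.mod_eq_zero_iff_dvd] at hmod
      have hyp : p ≤ y := Int.le_of_dvd (by omega) hmod
      have hfd : PySem.Int.floordiv y p = y / p := PySem.Int.floordiv_eq_ediv_of_pos (by omega)
      have hy1 : 1 ≤ y / p := by
        have := Int.ediv_le_ediv (by omega : (0:Int) < p) hyp
        simpa [Int.ediv_self (by omega : p ≠ 0)] using this
      have hylt : y / p < y := by
        have hcancel : y / p * p = y := Int.ediv_mul_cancel hmod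
        nlinarith [hy1]
      have ih := divOut_spec p hp f (y / p) hy1 (by push_cast at h2 ⊢; omega)
      rw [hfd, ih]
      constructor
      · rintro ⟨k, hk⟩
        exact ⟨k + 1, by rw [pow_succ, hk]; exact Int.ediv_mul_cancel hmod⟩
      · rintro ⟨k, hk⟩
        rcases Nat.eq_zero_or_pos k with rfl | hk1
        · simp at hk; omega
        · obtain ⟨m, rfl⟩ : ∃ m, k = m + 1 := ⟨k - 1, by omega⟩
          exact ⟨m, by rw [← hk, pow_succ, Int.mul_ediv_cancel _ (by omega)]⟩
    · rename_i hmod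
      simp only [PySem.Int.mod_eq_zero_iff_dvd] at hmod
      constructor
      · rintro rfl; exact ⟨0, pow_zero p⟩
      · rintro ⟨k, hk⟩
        rcases Nat.eq_zero_or_pos k with rfl | hk1
        · simpa using hk.symm
        · exfalso
          apply hmod
          obtain ⟨m, rfl⟩ : ∃ m, k = m + 1 := ⟨k - 1, by omega⟩
          rw [← hk, pow_succ]
          exact Dvd.intro_left _ rfl

theorem PP_two_le (x : Int) (h : PP x) : 2 ≤ x := by
  obtain ⟨p, k, hp, hk1, hk⟩ := h
  have h2 := hp.two_le
  have : (2:Int) ≤ (p:Int) ^ k := by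
    calc (2:Int) ≤ (p:Int) := by exact_mod_cast h2
    _ = (p:Int) ^ 1 := (pow_one _).symm
    _ ≤ (p:Int) ^ k := pow_le_pow_right₀ (by exact_mod_cast Nat.one_le_of_lt hp.one_lt) (by omega)
  omega

theorem primaire_alt_iff (x : Int) : primaire_alt x = true ↔ PP x := by
  unfold primaire_alt
  split
  · rename_i hx
    simp only [Bool.false_eq_true, false_iff]
    intro h
    exact absurd (PP_two_le x h) (by omega)
  · rename_i hx1
    have hx : 2 ≤ x := by omega
    have hfuel : x < ((2:Int) + (x.toNat + 2 : Nat)) * ((2:Int) + (x.toNat + 2 : Nat)) := by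
      push_cast; nlinarith [Int.self_le_toNat x]
    rcases sf_spec x (x.toNat + 2) 2 (le_refl _) hfuel with ⟨h0, hall⟩ | ⟨hp2, hpsq, hpdvd, hfirst⟩
    · rw [h0]
      simp only [reduceIte, true_iff]
      -- no factor ≤ √x : x is prime
      have hnp : Nat.Prime x.toNat := by
        rw [Nat.prime_def_le_sqrt]
        refine ⟨by omega, ?_⟩
        intro m hm2 hmsq hdvd
        refine hall (m : Int) (by exact_mod_cast hm2) ?_ ?_
        · have := (Nat.le_sqrt.1 hmsq)
          omega
        · have : (x.toNat : Int) = x := by omega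
          rw [← this]
          exact_mod_cast hdvd
      exact ⟨x.toNat, 1, hnp, le_refl _, by simpa using by omega⟩
    · set p := smallestFactorLoop x (x.toNat + 2) 2 with hpdef
      have hpne : ¬ p = 0 := by omega
      rw [if_neg hpne]
      -- p is the least nontrivial divisor of x, hence its smallest prime factor
      have hpprime : Nat.Prime p.toNat := by
        rw [Nat.prime_def_lt']
        refine ⟨by omega, ?_⟩
        intro m hm2 hmlt hdvd
        have hdvdI : (m : Int) ∣ p := by
          have : (p.toNat : Int) = p := by omega
          rw [← this]; exact_mod_cast hdvd
        refine hfirst (m : Int) (by exact_mod_cast hm2) (by omega)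
          (hdvdI.trans hpdvd)
      rw [decide_eq_true_eq, divOut_spec p (by omega) (x.toNat + 2) x (by omega) (by omega)]
      constructor
      · rintro ⟨k, hk⟩
        have hk1 : 1 ≤ k := by
          rcases Nat.eq_zero_or_pos k with rfl | h
          · simp at hk; omega
          · omega
        refine ⟨p.toNat, k, hpprime, hk1, ?_⟩
        rw [Int.toNat_of_nonneg (by omega)]
        exact hk
      · rintro ⟨q, k, hq, hk1, hk⟩
        -- p is a prime dividing q^k so p = q
        have hdn : p.toNat ∣ q ^ k := by
          have h1 : p.toNat ∣ x.toNat := by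
            rw [← Int.natCast_dvd_natCast, Int.toNat_of_nonneg (by omega : (0:Int) ≤ p),
              Int.toNat_of_nonneg (by omega : (0:Int) ≤ x)]
            exact hpdvd
          have h2 : x.toNat = q ^ k := by
            have : ((q ^ k : Nat) : Int) = x := by push_cast; exact hk
            omega
          rwa [h2] at h1
        have hpq : p.toNat = q :=
          (Nat.prime_dvd_prime_iff_eq hpprime hq).1 (hpprime.dvd_of_dvd_pow hdn)
        refine ⟨k, ?_⟩
        have : (p.toNat : Int) = p := by omega
        rw [← this, hpq]
        exact hk

-- ===== VERDICT (by name: the statement is the Claim_ definition above) =====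
theorem primaire_spec : Claim_equal_primaire := by
  intro x _
  unfold Spec_primaire
  rcases h : primaire_alt x with _ | _
  · rcases h2 : primaire x with _ | _
    · rfl
    · exact absurd ((primaire_alt_iff x).2 ((primaire_iff x).1 h2)) (by simp [h])
  · exact (primaire_iff x).2 ((primaire_alt_iff x).1 h)
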